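-- pv_equiv track=rewrite | github.com/nmarcin92/ed-edd-eddy | user_graph/UserGraphGenerator.py | generate_edge_dictionary
-- ===== SOURCE A (Python) =====
-- def generate_edge_dictionary(dictionary, connections):
--     result = dictionary
--     for connection in connections:
--         if connection[0] in result:
--             if connection[1] in result[connection[0]]:
--                 result[connection[0]][connection[1]] += 1
--             else:
--                 result[connection[0]][connection[1]] = 1
--         else:
--             result[connection[0]] = {}
--             result[connection[0]][connection[1]] = 1
--     return result
-- ===== SOURCE B (Python) =====
-- def generate_edge_dictionary(dictionary, connections):
--     # Pass 1: tally each directed edge into a counting dict keyed by the pair.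
--     tallies = {}
--     for connection in connections:
--         pair = (connection[0], connection[1])
--         tallies[pair] = tallies.get(pair, 0) + 1
--     # Pass 2: fold the tallies into the given dictionary (mutated and returned, like A).
--     for (a, b), c in tallies.items():
--         inner = dictionary.setdefault(a, {})
--         inner[b] = inner.get(b, 0) + c
--     return dictionary
-- ===== Notes on version B (the rewrite author's own statement) =====
-- stated objective: alternative
-- what changed: B first tallies each (source, target) edge pair into a counting dict in one pass, then folds those aggregated counts into the given dictionary in a second pass, instead of A's per-connection nested membership tests and increments.
import Mathlib
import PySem

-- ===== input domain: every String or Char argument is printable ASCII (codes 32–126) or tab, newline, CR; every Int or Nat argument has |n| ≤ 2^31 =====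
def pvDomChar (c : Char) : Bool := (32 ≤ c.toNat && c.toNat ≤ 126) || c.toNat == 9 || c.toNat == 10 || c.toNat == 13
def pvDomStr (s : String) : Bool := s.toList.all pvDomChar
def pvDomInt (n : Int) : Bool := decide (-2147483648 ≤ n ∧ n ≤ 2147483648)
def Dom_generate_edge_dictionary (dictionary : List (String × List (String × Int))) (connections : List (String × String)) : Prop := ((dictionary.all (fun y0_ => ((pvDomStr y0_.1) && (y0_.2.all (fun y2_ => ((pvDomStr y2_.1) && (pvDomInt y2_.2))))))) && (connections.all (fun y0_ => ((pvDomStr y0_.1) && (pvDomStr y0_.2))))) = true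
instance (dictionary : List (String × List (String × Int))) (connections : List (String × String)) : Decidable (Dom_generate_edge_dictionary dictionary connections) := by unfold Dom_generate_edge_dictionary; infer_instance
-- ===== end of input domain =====

-- B tallies the edge pairs in a first pass and folds the aggregated counts into the
-- dictionary in a second pass, instead of A's per-connection nested tests/increments;
-- both A and B mutate the passed-in dict in place, the equivalence is about the return value.

-- ===== PORT A =====
def generate_edge_dictionary (dictionary : List (String × List (String × Int))) (connections : List (String × String)) : List (String × List (String × Int)) :=
  ((connections.foldl (fun result connection =>
    if result.contains connection.1 then
      if (result.getD connection.1 PySem.Dict.empty).contains connection.2 then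
        result.insert connection.1 ((result.getD connection.1 PySem.Dict.empty).insert connection.2
          ((result.getD connection.1 PySem.Dict.empty).getD connection.2 0 + 1))
      else
        result.insert connection.1 ((result.getD connection.1 PySem.Dict.empty).insert connection.2 1)
    else
      result.insert connection.1 ((PySem.Dict.empty : PySem.Dict String Int).insert connection.2 1))
    (PySem.Dict.mk (dictionary.map (fun p => (p.1, PySem.Dict.mk p.2))) : PySem.Dict String (PySem.Dict String Int))).items.map
      (fun p => (p.1, p.2.items)))

-- ===== PORT B =====
def generate_edge_dictionary_alt (dictionary : List (String × List (String × Int))) (connections : List (String × String)) : List (String × List (String × Int)) :=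
  (((connections.foldl (fun t c => t.insert c (t.getD c 0 + 1))
      (PySem.Dict.empty : PySem.Dict (String × String) Int)).items.foldl (fun d pc =>
    d.insert pc.1.1 ((d.getD pc.1.1 PySem.Dict.empty).insert pc.1.2
      ((d.getD pc.1.1 PySem.Dict.empty).getD pc.1.2 0 + pc.2)))
    (PySem.Dict.mk (dictionary.map (fun p => (p.1, PySem.Dict.mk p.2))) : PySem.Dict String (PySem.Dict String Int))).items.map
      (fun p => (p.1, p.2.items)))

-- ===== PRECONDITION & SPEC =====
def Spec_generate_edge_dictionary (dictionary : List (String × List (String × Int))) (connections : List (String × String)) (out : List (String × List (String × Int))) : Prop := out = generate_edge_dictionary_alt dictionary connections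
instance (dictionary : List (String × List (String × Int))) (connections : List (String × String)) (out : List (String × List (String × Int))) : Decidable (Spec_generate_edge_dictionary dictionary connections out) := by unfold Spec_generate_edge_dictionary; infer_instance

-- ===== CLAIM (what is proved, stated in full; the proofs are below) =====
def Claim_equal_generate_edge_dictionary : Prop := ∀ (dictionary : List (String × List (String × Int))) (connections : List (String × String)), Dom_generate_edge_dictionary dictionary connections → Spec_generate_edge_dictionary dictionary connections (generate_edge_dictionary dictionary connections)

-- ===== LEMMAS AND PROOFS =====

-- A's loop body, named for the proofs (definitionally the lambda in the port of A).
def pvStep (d : PySem.Dict String (PySem.Dict String Int)) (c : String × String) : PySem.Dict String (PySem.Dict String Int) :=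
  if d.contains c.1 then
    if (d.getD c.1 PySem.Dict.empty).contains c.2 then
      d.insert c.1 ((d.getD c.1 PySem.Dict.empty).insert c.2
        ((d.getD c.1 PySem.Dict.empty).getD c.2 0 + 1))
    else
      d.insert c.1 ((d.getD c.1 PySem.Dict.empty).insert c.2 1)
  else
    d.insert c.1 ((PySem.Dict.empty : PySem.Dict String Int).insert c.2 1)

-- "add k to the count at edge c", B's loop body with an explicit count.
def pvApply (d : PySem.Dict String (PySem.Dict String Int)) (c : String × String) (k : Int) : PySem.Dict String (PySem.Dict String Int) :=
  d.insert c.1 ((d.getD c.1 PySem.Dict.empty).insert c.2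
    ((d.getD c.1 PySem.Dict.empty).getD c.2 0 + k))

-- edge c already recorded in d
def pvHas (d : PySem.Dict String (PySem.Dict String Int)) (c : String × String) : Bool :=
  d.contains c.1 && (d.getD c.1 PySem.Dict.empty).contains c.2

theorem pvStep_eq_apply_one (d : PySem.Dict String (PySem.Dict String Int)) (c : String × String) :
    pvStep d c = pvApply d c 1 := by
  unfold pvStep pvApply
  by_cases h1 : d.contains c.1
  · simp only [h1, if_true]
    by_cases h2 : (d.getD c.1 PySem.Dict.empty).contains c.2
    · simp [h2]
    · simp [h2, PySem.Dict.getD_of_not_contains _ _ (by simpa using h2)]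
  · simp [h1, PySem.Dict.getD_of_not_contains _ _ (by simpa using h1)]

theorem pvApply_succ (d : PySem.Dict String (PySem.Dict String Int)) (c : String × String) (k : Int) :
    pvApply (pvApply d c k) c 1 = pvApply d c (k + 1) := by
  unfold pvApply
  simp [PySem.Dict.getD_insert_self, PySem.Dict.insert_insert_self, add_assoc]

theorem pvHas_apply_self (d : PySem.Dict String (PySem.Dict String Int)) (c : String × String) (k : Int) :
    pvHas (pvApply d c k) c = true := by
  unfold pvHas pvApply
  simp [PySem.Dict.contains_insert_self, PySem.Dict.getD_insert_self]

theorem pvHas_apply_mono (d : PySem.Dict String (PySem.Dict String Int)) (c c' : String × String) (k : Int)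
    (h : pvHas d c = true) : pvHas (pvApply d c' k) c = true := by
  unfold pvHas pvApply
  unfold pvHas at h
  rw [Bool.and_eq_true] at h
  by_cases he : c.1 = c'.1
  · simp only [← he, PySem.Dict.contains_insert_self, PySem.Dict.getD_insert_self,
      Bool.true_and]
    rcases h with ⟨_, h2⟩
    simp [PySem.Dict.contains_insert, h2]
  · rcases h with ⟨h1, h2⟩
    simp [PySem.Dict.contains_insert, PySem.Dict.getD_insert_of_ne _ _ _ he, h1, h2]

-- two inserts at distinct keys commute as DICTS when the first key is already present
theorem pv_insert_comm_of_contains {κ ν : Type} [BEq κ] [LawfulBEq κ]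
    (d : PySem.Dict κ ν) (k k' : κ) (v v' : ν)
    (h : d.contains k = true) (hne : k' ≠ k) :
    (d.insert k' v').insert k v = (d.insert k v).insert k' v' := by
  apply PySem.Dict.ext
  have hk : (d.insert k' v').contains k = true := by
    simp [PySem.Dict.contains_insert, h]
  by_cases h' : d.contains k'
  · have hk' : (d.insert k v).contains k' = true := by
      simp [PySem.Dict.contains_insert, h']
    rw [PySem.Dict.items_insert_of_contains _ _ hk,
        PySem.Dict.items_insert_of_contains _ _ h',
        PySem.Dict.items_insert_of_contains _ _ hk',
        PySem.Dict.items_insert_of_contains _ _ h]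
    simp only [List.map_map]
    apply List.map_congr_left
    intro p _
    by_cases hp : p.1 = k'
    · simp [Function.comp, hp, hne]
    · by_cases hq : p.1 = k
      · simp [Function.comp, hq, Ne.symm hne]
      · simp [Function.comp, hp, hq]
  · have hk' : (d.insert k v).contains k' = false := by
      simp only [PySem.Dict.contains_insert, Bool.or_eq_false_iff]
      exact ⟨by simpa using hne, by simpa using h'⟩
    rw [PySem.Dict.items_insert_of_contains (d.insert k' v') v hk,
        PySem.Dict.items_insert_of_not_contains d v' (by simpa using h'),
        PySem.Dict.items_insert_of_not_contains (d.insert k v) v' hk',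
        PySem.Dict.items_insert_of_contains d v h]
    simp [List.map_append, hne]

theorem pvApply_comm (d : PySem.Dict String (PySem.Dict String Int)) (c c' : String × String)
    (k k' : Int) (h : pvHas d c = true) :
    pvApply (pvApply d c' k') c k = pvApply (pvApply d c k) c' k' := by
  rw [pvHas, Bool.and_eq_true] at h
  rcases h with ⟨h1, h2⟩
  by_cases ha : c'.1 = c.1
  · -- same outer key: collapse to one outer insert, commute the inner inserts
    unfold pvApply
    rw [ha]
    simp only [PySem.Dict.getD_insert_self, PySem.Dict.insert_insert_self]
    by_cases hb : c'.2 = c.2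
    · rw [hb]
      simp only [PySem.Dict.getD_insert_self, PySem.Dict.insert_insert_self]
      ring_nf
    · rw [PySem.Dict.getD_insert_of_ne _ _ _ (Ne.symm hb),
          PySem.Dict.getD_insert_of_ne _ _ _ hb,
          pv_insert_comm_of_contains _ _ _ _ _ h2 hb]
  · -- distinct outer keys
    unfold pvApply
    rw [PySem.Dict.getD_insert_of_ne _ _ _ (Ne.symm ha),
        PySem.Dict.getD_insert_of_ne _ _ _ ha,
        pv_insert_comm_of_contains _ _ _ _ _ h1 ha]

-- a (+1 at an already-present edge) commutes past the whole tally-application fold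
theorem pv_fold_apply_comm (l : List ((String × String) × Int))
    (d : PySem.Dict String (PySem.Dict String Int)) (c : String × String)
    (h : pvHas d c = true) :
    l.foldl (fun d pc => pvApply d pc.1 pc.2) (pvApply d c 1)
      = pvApply (l.foldl (fun d pc => pvApply d pc.1 pc.2) d) c 1 := by
  induction l generalizing d with
  | nil => rfl
  | cons p l ih =>
    simp only [List.foldl_cons]
    rw [← pvApply_comm d c p.1 1 p.2 h, ih _ (pvHas_apply_mono _ _ _ _ h)]

-- the heart: adding one occurrence of edge c to the tally and then applying the tally
-- is the same as applying the old tally and then doing A's step for c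
theorem pv_tallyAdd (t : PySem.Dict (String × String) Int) (c : String × String)
    (hnd : t.keys.Nodup) (d0 : PySem.Dict String (PySem.Dict String Int)) :
    (t.insert c (t.getD c 0 + 1)).items.foldl (fun d pc => pvApply d pc.1 pc.2) d0
      = pvStep (t.items.foldl (fun d pc => pvApply d pc.1 pc.2) d0) c := by
  rw [pvStep_eq_apply_one]
  by_cases h : t.contains c
  · -- c already tallied: its entry is overwritten in place
    obtain ⟨v, hv⟩ : ∃ v, t.get? c = some v := by
      rw [PySem.Dict.contains_eq_isSome_get?] at h
      exact Option.isSome_iff_exists.mp h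
    have hgd : t.getD c 0 = v := by
      rw [PySem.Dict.getD_eq_get?_getD, hv]; rfl
    obtain ⟨l1, l2, hsplit⟩ := List.append_of_mem (PySem.Dict.mem_items_of_get?_eq_some t hv)
    have hnd' := hnd
    unfold PySem.Dict.keys at hnd'
    rw [hsplit] at hnd'
    simp only [List.map_append, List.map_cons, List.nodup_append, List.nodup_cons] at hnd'
    have hc1 : ∀ p ∈ l1, p.1 ≠ c := by
      intro p hp he
      exact hnd'.2.2 p.1 (List.mem_map_of_mem hp) c (by simp) he
    have hc2 : ∀ p ∈ l2, p.1 ≠ c := by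
      intro p hp he
      exact hnd'.2.1.1 (he ▸ List.mem_map_of_mem hp)
    have hins : (t.insert c (t.getD c 0 + 1)).items = l1 ++ (c, v + 1) :: l2 := by
      rw [PySem.Dict.items_insert_of_contains _ _ h, hsplit, hgd]
      simp only [List.map_append, List.map_cons, BEq.rfl, if_true]
      congr 1
      · exact (List.map_congr_left fun p hp => by simp [hc1 p hp]).trans (List.map_id _)
      · congr 1
        exact (List.map_congr_left fun p hp => by simp [hc2 p hp]).trans (List.map_id _)
    rw [hins, hsplit]
    simp only [List.foldl_append, List.foldl_cons]
    rw [← pv_fold_apply_comm l2 _ c (pvHas_apply_self _ _ _), pvApply_succ]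
  · -- fresh edge: the new tally entry is appended at the end
    rw [PySem.Dict.items_insert_of_not_contains _ _ (by simpa using h),
        PySem.Dict.getD_of_not_contains _ _ (by simpa using h)]
    simp [List.foldl_append]

-- tally-then-apply equals A's direct fold, for every starting dictionary
theorem pv_main (cs : List (String × String)) (d0 : PySem.Dict String (PySem.Dict String Int)) :
    (cs.foldl (fun t c => t.insert c (t.getD c 0 + 1)) PySem.Dict.empty).items.foldl
        (fun d pc => pvApply d pc.1 pc.2) d0
      = cs.foldl pvStep d0 := by
  induction cs using List.reverseRecOn with
  | nil => rfl
  | append_singleton cs c ih =>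
    have hnd : (cs.foldl (fun t c => t.insert c (t.getD c 0 + 1)) (PySem.Dict.empty : PySem.Dict (String × String) Int)).keys.Nodup :=
      PySem.Dict.nodup_keys_foldl_insert cs (fun t c => t.getD c 0 + 1) PySem.Dict.empty
        PySem.Dict.nodup_keys_empty
    simp only [List.foldl_append, List.foldl_cons, List.foldl_nil]
    rw [pv_tallyAdd _ c hnd d0, ih]

-- ===== VERDICT (by name: the statement is the Claim_ definition above) =====
theorem generate_edge_dictionary_spec : Claim_equal_generate_edge_dictionary := by
  intro dictionary connections _
  unfold Spec_generate_edge_dictionary generate_edge_dictionary generate_edge_dictionary_alt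
  rw [show (fun (result : PySem.Dict String (PySem.Dict String Int)) (connection : String × String) =>
    if result.contains connection.1 then
      if (result.getD connection.1 PySem.Dict.empty).contains connection.2 then
        result.insert connection.1 ((result.getD connection.1 PySem.Dict.empty).insert connection.2
          ((result.getD connection.1 PySem.Dict.empty).getD connection.2 0 + 1))
      else
        result.insert connection.1 ((result.getD connection.1 PySem.Dict.empty).insert connection.2 1)
    else
      result.insert connection.1 ((PySem.Dict.empty : PySem.Dict String Int).insert connection.2 1)) = pvStep from rfl,
    ← pv_main connections (PySem.Dict.mk (dictionary.map (fun p => (p.1, PySem.Dict.mk p.2))))]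
  rfl
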